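-- pv_equiv track=rewrite | github.com/k-roy/MAGESTIC | bedgraph_computation.py | return_coordinate_with_max_reads_in_range
-- ===== SOURCE A (Python) =====
-- def return_coordinate_with_max_reads_in_range(chromosome, start, end, bedgraph_dict):
--     '''
--     input: a query chromosome, start, and end coordinates, and a bedgraph_dict
--     output: the coordinate with the max value over the chromosomal coordinate range
--     '''
--     coord_with_max_reads = None
--     max_reads = 0
--     for idx in range(start, end):
--         reads = bedgraph_dict[chromosome].get(idx, 0)
--         if reads > max_reads:
--             max_reads = reads
--             coord_with_max_reads = idx
--     return coord_with_max_reads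
-- ===== SOURCE B (Python) =====
-- def return_coordinate_with_max_reads_in_range(chromosome, start, end, bedgraph_dict):
--     counts = bedgraph_dict.get(chromosome, {})
--     best_coord = None
--     best_reads = 0
--     for coord in sorted(k for k in counts if start <= k < end):
--         reads = counts[coord]
--         if reads > best_reads:
--             best_reads = reads
--             best_coord = coord
--     return best_coord
-- ===== Notes on version B (the rewrite author's own statement) =====
-- stated objective: alternative
-- what changed: B iterates only the chromosome's stored coordinates (filtered to [start,end) and sorted) with a dict.get fallback, instead of probing the dict at every integer in range(start,end).
import Mathlib
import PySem

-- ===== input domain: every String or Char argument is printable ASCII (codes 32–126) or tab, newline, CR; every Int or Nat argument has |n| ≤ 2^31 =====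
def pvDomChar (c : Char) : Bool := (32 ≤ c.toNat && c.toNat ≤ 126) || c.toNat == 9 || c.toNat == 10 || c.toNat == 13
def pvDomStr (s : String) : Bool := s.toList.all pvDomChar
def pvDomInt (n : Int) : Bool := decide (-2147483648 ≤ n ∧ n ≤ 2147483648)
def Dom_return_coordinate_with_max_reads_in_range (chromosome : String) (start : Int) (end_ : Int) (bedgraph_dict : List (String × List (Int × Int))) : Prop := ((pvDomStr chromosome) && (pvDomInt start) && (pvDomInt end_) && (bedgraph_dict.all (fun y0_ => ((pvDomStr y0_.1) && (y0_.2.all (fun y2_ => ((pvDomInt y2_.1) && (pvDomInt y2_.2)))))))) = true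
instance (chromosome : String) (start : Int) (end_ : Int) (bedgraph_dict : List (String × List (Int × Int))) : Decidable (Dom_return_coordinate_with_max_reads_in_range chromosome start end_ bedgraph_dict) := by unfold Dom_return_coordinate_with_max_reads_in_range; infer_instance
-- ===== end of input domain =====

-- B iterates only the stored coordinates of the chromosome (filtered to the range, sorted)
-- instead of scanning every integer in [start, end); return value equivalence is proved on Pre_.

-- ===== PORT A =====
-- A scans every idx in range(start, end), looking up bedgraph_dict[chromosome].get(idx, 0)
-- inside the loop; a missing chromosome would raise KeyError in Python (excluded by Pre_),
-- the port reads [] there (unreachable under Pre_ when the loop runs).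
def return_coordinate_with_max_reads_in_range (chromosome : String) (start : Int) (end_ : Int) (bedgraph_dict : List (String × List (Int × Int))) : Option Int :=
  ((PySem.List.pyRange start end_ 1).foldl
    (fun (st : Option Int × Int) idx =>
      if PySem.Dict.getD (PySem.Dict.ofList ((PySem.Dict.ofList bedgraph_dict).getD chromosome [])) idx 0 > st.2
      then (some idx, PySem.Dict.getD (PySem.Dict.ofList ((PySem.Dict.ofList bedgraph_dict).getD chromosome [])) idx 0)
      else st)
    (none, 0)).1

-- ===== PORT B =====
-- counts[coord] is exact as getD: coord is drawn from counts' own keys, so the lookup never raises.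
def return_coordinate_with_max_reads_in_range_alt (chromosome : String) (start : Int) (end_ : Int) (bedgraph_dict : List (String × List (Int × Int))) : Option Int :=
  let counts := PySem.Dict.ofList ((PySem.Dict.ofList bedgraph_dict).getD chromosome [])
  ((PySem.List.sorted ((PySem.Dict.keys counts).filter (fun k => decide (start ≤ k) && decide (k < end_))) (fun x => x) false).foldl
    (fun (st : Option Int × Int) coord =>
      if counts.getD coord 0 > st.2
      then (some coord, counts.getD coord 0)
      else st)
    (none, 0)).1

-- ===== PRECONDITION & SPEC =====
-- Pre_ excludes exactly the inputs where Python A raises KeyError: a non-empty range with the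
-- chromosome missing from bedgraph_dict (for an empty range A never indexes the dict).
def Pre_return_coordinate_with_max_reads_in_range (chromosome : String) (start : Int) (end_ : Int) (bedgraph_dict : List (String × List (Int × Int))) : Prop :=
  start < end_ → (PySem.Dict.ofList bedgraph_dict).contains chromosome = true
instance (chromosome : String) (start : Int) (end_ : Int) (bedgraph_dict : List (String × List (Int × Int))) : Decidable (Pre_return_coordinate_with_max_reads_in_range chromosome start end_ bedgraph_dict) := by unfold Pre_return_coordinate_with_max_reads_in_range; infer_instance

def pvWitness_return_coordinate_with_max_reads_in_range : String × Int × Int × (List (String × List (Int × Int))) :=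
  ("chr1", 0, 5, [("chr1", [(2, 3), (4, 3)])])


def Spec_return_coordinate_with_max_reads_in_range (chromosome : String) (start : Int) (end_ : Int) (bedgraph_dict : List (String × List (Int × Int))) (out : Option Int) : Prop := out = return_coordinate_with_max_reads_in_range_alt chromosome start end_ bedgraph_dict
instance (chromosome : String) (start : Int) (end_ : Int) (bedgraph_dict : List (String × List (Int × Int))) (out : Option Int) : Decidable (Spec_return_coordinate_with_max_reads_in_range chromosome start end_ bedgraph_dict out) := by unfold Spec_return_coordinate_with_max_reads_in_range; infer_instance

-- ===== CLAIM (what is proved, stated in full; the proofs are below) =====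
def Claim_equal_return_coordinate_with_max_reads_in_range : Prop := ∀ (chromosome : String) (start : Int) (end_ : Int) (bedgraph_dict : List (String × List (Int × Int))), Dom_return_coordinate_with_max_reads_in_range chromosome start end_ bedgraph_dict → Pre_return_coordinate_with_max_reads_in_range chromosome start end_ bedgraph_dict → Spec_return_coordinate_with_max_reads_in_range chromosome start end_ bedgraph_dict (return_coordinate_with_max_reads_in_range chromosome start end_ bedgraph_dict)

-- ===== LEMMAS AND PROOFS =====

-- the shared loop body, with the chromosome's count dict fixed
def pvStep (c : PySem.Dict Int Int) (st : Option Int × Int) (k : Int) : Option Int × Int :=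
  if c.getD k 0 > st.2 then (some k, c.getD k 0) else st

lemma pvStep_snd_nonneg (c : PySem.Dict Int Int) (st : Option Int × Int) (k : Int)
    (h : 0 ≤ st.2) : 0 ≤ (pvStep c st k).2 := by
  unfold pvStep; split
  · simpa using le_of_lt (lt_of_le_of_lt h (by assumption))
  · exact h

-- coordinates whose stored value is not positive never change the state
lemma foldl_pvStep_filter_pos (c : PySem.Dict Int Int) (L : List Int) :
    ∀ st : Option Int × Int, 0 ≤ st.2 →
    L.foldl (pvStep c) st = (L.filter (fun k => decide (0 < c.getD k 0))).foldl (pvStep c) st := by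
  induction L with
  | nil => intro st _; rfl
  | cons k L ih =>
    intro st hst
    rw [List.filter_cons]
    by_cases hp : 0 < c.getD k 0
    · rw [if_pos (decide_eq_true hp), List.foldl_cons, List.foldl_cons]
      exact ih _ (pvStep_snd_nonneg c st k hst)
    · have hstep : pvStep c st k = st := by
        unfold pvStep
        have : ¬ c.getD k 0 > st.2 := not_lt.mpr (le_trans (not_lt.mp hp) hst)
        simp [this]
      rw [if_neg (by simpa using hp), List.foldl_cons, hstep]
      exact ih st hst

-- the sorted, range-filtered key list of B IS the range list of A filtered to stored keys
lemma sorted_keys_eq_range_filter (c : PySem.Dict Int Int) (start end_ : Int)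
    (hnd : c.keys.Nodup) :
    PySem.List.sorted ((PySem.Dict.keys c).filter (fun k => decide (start ≤ k) && decide (k < end_))) (fun x => x) false
      = (PySem.List.pyRange start end_ 1).filter (fun k => c.contains k) := by
  apply PySem.List.sorted_eq_of_perm_of_pairwise_lt
  · rw [List.perm_ext_iff_of_nodup ((PySem.List.nodup_pyRange_one start end_).filter _) (hnd.filter _)]
    intro x
    simp only [List.mem_filter, PySem.List.mem_pyRange_one, ← PySem.Dict.contains_iff_mem_keys]
    constructor
    · rintro ⟨⟨h1, h2⟩, h3⟩; exact ⟨h3, by simp [h1, h2]⟩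
    · rintro ⟨h1, h2⟩; simp only [Bool.and_eq_true, decide_eq_true_eq] at h2; exact ⟨h2, h1⟩
  · exact (PySem.List.pairwise_lt_pyRange_one start end_).filter _

lemma filter_contains_filter_pos (c : PySem.Dict Int Int) (L : List Int) :
    ((L.filter (fun k => c.contains k)).filter (fun k => decide (0 < c.getD k 0)))
      = L.filter (fun k => decide (0 < c.getD k 0)) := by
  rw [List.filter_filter]
  apply List.filter_congr
  intro k _
  by_cases hc : c.contains k
  · simp [hc]
  · have : c.getD k 0 = 0 := PySem.Dict.getD_of_not_contains c 0 (by simpa using hc)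
    simp [hc, this]

-- ===== VERDICT (by name: the statement is the Claim_ definition above) =====
theorem return_coordinate_with_max_reads_in_range_spec : Claim_equal_return_coordinate_with_max_reads_in_range := by
  intro chromosome start end_ bedgraph_dict _ _
  unfold Spec_return_coordinate_with_max_reads_in_range
  unfold return_coordinate_with_max_reads_in_range return_coordinate_with_max_reads_in_range_alt
  set c := PySem.Dict.ofList ((PySem.Dict.ofList bedgraph_dict).getD chromosome []) with hc
  show ((PySem.List.pyRange start end_ 1).foldl (pvStep c) (none, 0)).1
      = ((PySem.List.sorted ((PySem.Dict.keys c).filter (fun k => decide (start ≤ k) && decide (k < end_))) (fun x => x) false).foldl (pvStep c) (none, 0)).1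
  rw [sorted_keys_eq_range_filter c start end_ (PySem.Dict.nodup_keys_ofList _),
      foldl_pvStep_filter_pos c _ (none, 0) (by norm_num),
      foldl_pvStep_filter_pos c ((PySem.List.pyRange start end_ 1).filter (fun k => c.contains k)) (none, 0) (by norm_num),
      filter_contains_filter_pos]
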